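-- pv_equiv track=rewrite | github.com/katwojewoda/Krypto-lab | lab1.py | col_text
-- ===== SOURCE A (Python) =====
-- def col_text(plaintext):
--     """
--     Puts file content gruped by 5 characters into 7 collumns.
--     Parameters:
--         plaintext (string) - file content
--     Returns:
--         text in collums
--     Raises:
--         TypeError: plaintext is not a string
--     """
--     if type(plaintext) != str:
--         raise TypeError
--
--     line_num = 0
--     lines = []
--     while line_num*35 < len(plaintext):
--         line = plaintext[35*line_num:35*(line_num+1)]
--         cols = [(line[5*col_num:len(line)], line[5*col_num:5*(col_num+1)])[(col_num + 1)*5 < len(line)] for col_num in range(7)]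
--         lines.append(' '.join(cols))
--         line_num += 1
--     return '\n'.join(lines)
-- ===== SOURCE B (Python) =====
-- def col_text(plaintext):
--     if type(plaintext) != str:
--         raise TypeError
--     chunks = [plaintext[i:i+5] for i in range(0, len(plaintext), 5)]
--     chunks += [''] * ((-len(chunks)) % 7)
--     return '\n'.join(' '.join(chunks[r:r+7]) for r in range(0, len(chunks), 7))
-- ===== Notes on version B (the rewrite author's own statement) =====
-- stated objective: faster
-- what changed: Replaces A's nested line/column loop (7 conditional slices per 35-char line) with a flat one-pass chunking into 5-char pieces, padding with empty strings to a multiple of 7, then regrouping the flat chunk list into rows of 7.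
import Mathlib
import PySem

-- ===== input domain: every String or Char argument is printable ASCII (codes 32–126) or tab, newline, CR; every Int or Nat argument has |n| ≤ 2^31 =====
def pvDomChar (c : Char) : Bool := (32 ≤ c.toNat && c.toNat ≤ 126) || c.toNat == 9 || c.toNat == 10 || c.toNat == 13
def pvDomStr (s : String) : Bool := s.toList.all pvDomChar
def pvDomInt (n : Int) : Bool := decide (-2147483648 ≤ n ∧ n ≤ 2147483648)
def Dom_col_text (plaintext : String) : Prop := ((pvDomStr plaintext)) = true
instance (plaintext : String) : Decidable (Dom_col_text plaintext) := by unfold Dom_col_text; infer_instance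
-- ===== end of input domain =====

-- B replaces A's nested line/column loop by flat 5-char chunking, padding to a multiple of 7, and regrouping into rows of 7 (different decomposition; measured faster in a timing run).
-- (Python's TypeError guard for non-str input is subsumed by the Lean type of the argument.)

-- ===== PORT A =====
-- the inner list comprehension: cols = [(line[5*c:len(line)], line[5*c:5*(c+1)])[(c+1)*5 < len(line)] for c in range(7)]
def colRowA (line : List Char) : List Char :=
  PySem.Chars.join [' '] ((PySem.List.pyRange 0 7 1).map (fun c =>
    if (c + 1) * 5 < (line.length : Int)
    then PySem.List.slice line (some (5 * c)) (some (5 * (c + 1)))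
    else PySem.List.slice line (some (5 * c)) (some (line.length : Int))))

-- the while loop: while line_num*35 < len(plaintext): lines.append(' '.join(cols)); line_num += 1
def colLinesA (s : List Char) (ln : Nat) : List (List Char) :=
  if ((ln : Int) * 35 < (s.length : Int)) then
    colRowA (PySem.List.slice s (some (35 * (ln : Int))) (some (35 * ((ln : Int) + 1))))
      :: colLinesA s (ln + 1)
  else []
termination_by s.length - 35 * ln
decreasing_by omega

def col_text (plaintext : String) : String :=
  String.ofList (PySem.Chars.join ['\n'] (colLinesA plaintext.toList 0))

-- ===== PORT B =====
def col_text_alt (plaintext : String) : String :=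
  let s := plaintext.toList
  let chunks := (PySem.List.pyRange 0 (s.length : Int) 5).map
    (fun i => PySem.List.slice s (some i) (some (i + 5)))
  let chunks2 := chunks ++ List.replicate (PySem.Int.mod (-(chunks.length : Int)) 7).toNat []
  String.ofList (PySem.Chars.join ['\n'] ((PySem.List.pyRange 0 (chunks2.length : Int) 7).map
    (fun r => PySem.Chars.join [' '] (PySem.List.slice chunks2 (some r) (some (r + 7))))))

-- ===== PRECONDITION & SPEC =====
def Spec_col_text (plaintext : String) (out : String) : Prop := out = col_text_alt plaintext
instance (plaintext : String) (out : String) : Decidable (Spec_col_text plaintext out) := by unfold Spec_col_text; infer_instance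

-- ===== CLAIM (what is proved, stated in full; the proofs are below) =====
def Claim_equal_col_text : Prop := ∀ (plaintext : String), Dom_col_text plaintext → Spec_col_text plaintext (col_text plaintext)

-- ===== LEMMAS AND PROOFS =====

-- take k of drop a of a range-map is a shifted range-map
theorem pv_take_drop_range_map {β : Type} (f : Nat → β) (n a k : Nat) (h : a + k ≤ n) :
    ((((List.range n).map f).drop a).take k) = (List.range k).map (fun i => f (a + i)) := by
  apply List.ext_getElem
  · simp; omega
  · intro i h1 h2
    simp [Nat.add_comm a i]

-- extending a range-map by indices where the value is [] is appending replicate []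
theorem pv_range_map_pad {β : Type} (f : Nat → List β) (m M : Nat) (hm : m ≤ M)
    (hnil : ∀ i, m ≤ i → f i = []) :
    (List.range M).map f = (List.range m).map f ++ List.replicate (M - m) [] := by
  have : M = m + (M - m) := by omega
  rw [this, List.range_add, List.map_append]
  congr 1
  apply List.ext_getElem
  · simp
  · intro i h1 h2
    simp only [List.getElem_map, List.getElem_range, List.getElem_replicate]
    exact hnil _ (by omega)

-- one row of A equals ' '.join of the seven 5-char pieces of the 35-char window
theorem pv_colRowA_eq (t : List Char) :
    colRowA (t.take 35) =
      PySem.Chars.join [' '] ((List.range 7).map (fun c => (t.drop (5 * c)).take 5)) := by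
  unfold colRowA
  congr 1
  rw [PySem.List.pyRange_one]
  simp only [List.map_map]
  apply List.ext_getElem
  · simp
  · intro i h1 h2
    simp only [List.getElem_map, List.getElem_range, Function.comp]
    have hlen : (t.take 35).length = min 35 t.length := by simp
    have hdt : ∀ c : Nat, c < 7 → ((t.take 35).drop (5 * c)).take 5 = (t.drop (5 * c)).take 5 := by
      intro c hc
      rw [List.drop_take, List.take_take]
      congr 1
      omega
    by_cases hcond : ((0 : Int) + i + 1) * 5 < ((t.take 35).length : Int)
    · rw [if_pos hcond]
      have : PySem.List.slice (t.take 35) (some (5 * ((0:Int) + i))) (some (5 * ((0:Int) + i + 1)))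
          = ((t.take 35).drop (5 * i)).take 5 := by
        have := PySem.List.slice_natCast_add (t.take 35) (5 * i) 5
        push_cast at this ⊢
        rw [show (5 : Int) * (0 + (i:Int)) = ((5 * i : Nat) : Int) by push_cast; ring,
            show (5 : Int) * (0 + (i:Int) + 1) = ((5 * i : Nat) : Int) + ((5 : Nat) : Int) by push_cast; ring]
        exact this
      rw [this, hdt i h1]
    · rw [if_neg hcond]
      have hle : (t.take 35).length ≤ 5 * i + 5 := by
        push_cast at hcond; omega
      have h5 : PySem.List.slice (t.take 35) (some (5 * ((0:Int) + i))) (some (((t.take 35).length : Int)))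
          = ((t.take 35).drop (5 * i)).take ((t.take 35).length - 5 * i) := by
        have := PySem.List.slice_natCast (t.take 35) (5 * i) ((t.take 35).length)
        push_cast at this ⊢
        rw [show (5 : Int) * (0 + (i:Int)) = ((5 * i : Nat) : Int) by push_cast; ring]
        exact this
      rw [h5]
      have hfull1 : ((t.take 35).drop (5 * i)).take ((t.take 35).length - 5 * i)
          = (t.take 35).drop (5 * i) := List.take_of_length_le (by simp)
      have hfull2 : ((t.take 35).drop (5 * i)).take 5 = (t.take 35).drop (5 * i) :=
        List.take_of_length_le (by simp; omega)
      rw [hfull1, ← hfull2, hdt i h1]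

-- A's while loop in closed form: one row per 35-char window
theorem pv_colLinesA_eq (s : List Char) (ln : Nat) :
    colLinesA s ln =
      (List.range ((s.length + 34) / 35 - ln)).map
        (fun r => colRowA ((s.drop (35 * (ln + r))).take 35)) := by
  rw [colLinesA]
  by_cases h : ((ln : Int) * 35 < (s.length : Int))
  · rw [if_pos h]
    have hlt : 35 * ln < s.length := by push_cast at h; omega
    have hcnt : (s.length + 34) / 35 - ln = ((s.length + 34) / 35 - (ln + 1)) + 1 := by omega
    rw [hcnt, List.range_succ_eq_map, List.map_cons, List.map_map]
    congr 1
    · have : PySem.List.slice s (some (35 * (ln : Int))) (some (35 * ((ln : Int) + 1)))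
          = (s.drop (35 * ln)).take 35 := by
        have := PySem.List.slice_natCast_add s (35 * ln) 35
        rw [show (35 : Int) * (ln : Int) = ((35 * ln : Nat) : Int) by push_cast; ring,
            show (35 : Int) * ((ln : Int) + 1) = ((35 * ln : Nat) : Int) + ((35 : Nat) : Int) by push_cast; ring]
        exact this
      rw [this, Nat.add_zero]
    · rw [pv_colLinesA_eq s (ln + 1)]
      apply List.map_congr_left
      intro r _
      simp only [Function.comp]
      have h35 : 35 * (ln + 1 + r) = 35 * (ln + r.succ) := by omega
      rw [h35]
  · rw [if_neg h]
    have : (s.length + 34) / 35 - ln = 0 := by push_cast at h; omega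
    rw [this]
    simp
termination_by s.length - 35 * ln
decreasing_by omega

-- zeta-reduced form of col_text_alt (definitional)
theorem pv_alt_unfold (plaintext : String) :
    col_text_alt plaintext =
      String.ofList (PySem.Chars.join ['\n']
        ((PySem.List.pyRange 0 (((((PySem.List.pyRange 0 ((plaintext.toList.length : Nat) : Int) 5).map
              (fun i => PySem.List.slice plaintext.toList (some i) (some (i + 5)))) ++
            List.replicate (PySem.Int.mod (-((((PySem.List.pyRange 0 ((plaintext.toList.length : Nat) : Int) 5).map
              (fun i => PySem.List.slice plaintext.toList (some i) (some (i + 5)))).length : Nat) : Int)) 7).toNat []).length : Nat) : Int) 7).map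
          (fun r => PySem.Chars.join [' '] (PySem.List.slice
            (((PySem.List.pyRange 0 ((plaintext.toList.length : Nat) : Int) 5).map
              (fun i => PySem.List.slice plaintext.toList (some i) (some (i + 5)))) ++
            List.replicate (PySem.Int.mod (-((((PySem.List.pyRange 0 ((plaintext.toList.length : Nat) : Int) 5).map
              (fun i => PySem.List.slice plaintext.toList (some i) (some (i + 5)))).length : Nat) : Int)) 7).toNat [])
            (some r) (some (r + 7)))))) := rfl

-- B's flat chunk list in closed form
theorem pv_chunks_eq (s : List Char) :
    (PySem.List.pyRange 0 (s.length : Int) 5).map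
        (fun i => PySem.List.slice s (some i) (some (i + 5)))
      = (List.range ((s.length + 4) / 5)).map (fun i => (s.drop (5 * i)).take 5) := by
  rw [PySem.List.pyRange_of_pos 0 (s.length : Int) (by omega)]
  have hcnt : (if (0 : Int) < (s.length : Int) then (((s.length : Int) - 0 + 5 - 1) / 5).toNat else 0)
      = (s.length + 4) / 5 := by
    by_cases h : (0 : Int) < (s.length : Int)
    · rw [if_pos h]; omega
    · rw [if_neg h]; omega
  rw [hcnt, List.map_map]
  apply List.map_congr_left
  intro i _
  simp only [Function.comp]
  have := PySem.List.slice_natCast_add s (5 * i) 5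
  rw [show (0 : Int) + 5 * (i : Int) = ((5 * i : Nat) : Int) by push_cast; ring]
  rw [show ((5 * i : Nat) : Int) + 5 = ((5 * i : Nat) : Int) + ((5 : Nat) : Int) by push_cast; ring]
  exact this

-- ===== VERDICT (by name: the statement is the Claim_ definition above) =====
theorem col_text_spec : Claim_equal_col_text := by
  intro plaintext _
  unfold Spec_col_text col_text
  rw [pv_alt_unfold]
  set s := plaintext.toList with hs
  set N := s.length with hN
  set f : Nat → List Char := fun i => (s.drop (5 * i)).take 5 with hf
  set m := (N + 4) / 5 with hm
  set L := (m + 6) / 7 with hL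
  -- B side
  rw [pv_chunks_eq]
  have hmlen : ((List.range m).map f).length = m := by simp
  have hpad : (PySem.Int.mod (-((((List.range m).map f).length : Nat) : Int)) 7).toNat = 7 * L - m := by
    rw [hmlen, PySem.Int.mod_eq_emod_of_pos (by omega)]; omega
  rw [hpad]
  have hnil : ∀ i, m ≤ i → f i = [] := by
    intro i hi
    have : s.length ≤ 5 * i := by omega
    simp [hf, List.drop_eq_nil_of_le this]
  have hchunks2 : (List.range m).map f ++ List.replicate (7 * L - m) [] = (List.range (7 * L)).map f := by
    rw [pv_range_map_pad f m (7 * L) (by omega) hnil]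
  rw [hchunks2]
  have hlen2 : (((List.range (7 * L)).map f).length : Nat) = 7 * L := by simp
  rw [hlen2]
  have hrows : (PySem.List.pyRange 0 ((7 * L : Nat) : Int) 7).map
      (fun r => PySem.Chars.join [' '] (PySem.List.slice ((List.range (7 * L)).map f) (some r) (some (r + 7))))
      = (List.range L).map (fun r => PySem.Chars.join [' '] ((List.range 7).map (fun c => f (7 * r + c)))) := by
    rw [PySem.List.pyRange_of_pos 0 ((7 * L : Nat) : Int) (by omega)]
    have hcnt : (if (0 : Int) < ((7 * L : Nat) : Int) then ((((7 * L : Nat) : Int) - 0 + 7 - 1) / 7).toNat else 0) = L := by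
      by_cases h : (0 : Int) < ((7 * L : Nat) : Int)
      · rw [if_pos h]; omega
      · rw [if_neg h]; omega
    rw [hcnt, List.map_map]
    apply List.map_congr_left
    intro r hr
    simp only [Function.comp]
    congr 1
    have hsl : PySem.List.slice ((List.range (7 * L)).map f) (some ((0 : Int) + 7 * (r : Int))) (some ((0 : Int) + 7 * (r : Int) + 7))
        = (((List.range (7 * L)).map f).drop (7 * r)).take 7 := by
      have := PySem.List.slice_natCast_add ((List.range (7 * L)).map f) (7 * r) 7
      rw [show (0 : Int) + 7 * (r : Int) = ((7 * r : Nat) : Int) by push_cast; ring]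
      rw [show ((7 * r : Nat) : Int) + 7 = ((7 * r : Nat) : Int) + ((7 : Nat) : Int) by push_cast; ring]
      exact this
    rw [hsl]
    have hrL : r < L := by
      simp only [List.mem_range] at hr; exact hr
    rw [pv_take_drop_range_map f (7 * L) (7 * r) 7 (by omega)]
  rw [hrows]
  -- A side
  rw [pv_colLinesA_eq s 0]
  have hLL : (N + 34) / 35 - 0 = L := by omega
  rw [hLL]
  congr 1
  congr 1
  apply List.map_congr_left
  intro r _
  rw [Nat.zero_add, pv_colRowA_eq (s.drop (35 * r))]
  congr 1
  apply List.map_congr_left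
  intro c _
  simp only [hf, List.drop_drop]
  congr 2
  omega
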